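-- pv_equiv track=rewrite | github.com/pedrovponte/IART-g39 | src/heuristics.py | calculateManhattan
-- ===== SOURCE A (Python) =====
-- def getPiecePositions(board):
--     pieces = []
--     for row in range(0, len(board)):
--         for col in range(0, len(board[row])):
--             if((board[row][col][0] == 'I' and len(board[row][col]) < 3) or (board[row][col][0] == 'I' and len(board[row][col]) > 2 and board[row][col][3] != board[row][col][1])):
--                pieces.append([row, col, board[row][col][1]])
--     return pieces
--
-- def getFinalPiecePositions(board):
--     pieces = []
--     for row in range(0, len(board)):
--         for col in range(0, len(board[row])):
--             if((board[row][col][0] == 'F') and (len(board[row][col]) < 3)):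
--                pieces.append([row, col, board[row][col][1]])
--             elif(len(board[row][col]) > 2 and (len(board[row][col]) > 2 and board[row][col][1] != board[row][col][3])):
--                 pieces.append([row, col, board[row][col][3]])
--     return pieces
--
-- def calculateManhattan(board):
--     initialPieces = getPiecePositions(board)
--     finalPieces = getFinalPiecePositions(board)
--     manDict = 0
--     for i,item in enumerate(initialPieces):
--         for j,item2 in enumerate(finalPieces):
--             if(item[2]==item2[2]):
--                 manDict += abs(item[0]-item2[0]) + abs(item[1]- item2[1])
--     return manDict
-- ===== SOURCE B (Python) =====
-- def _bisect_left(a, x, lo, hi):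
--     # leftmost insertion point of x in sorted a[lo:hi] (hand-rolled: A imports nothing)
--     if lo < hi:
--         mid = (lo + hi) // 2
--         if a[mid] < x:
--             return _bisect_left(a, x, mid + 1, hi)
--         else:
--             return _bisect_left(a, x, lo, mid)
--     return lo
--
-- def _cross_abs_sum(xs, ys):
--     # sum(abs(x - y) for x in xs for y in ys) via sorting ys + prefix sums + binary search
--     ys = sorted(ys)
--     n = len(ys)
--     pre = [0]
--     s = 0
--     for y in ys:
--         s += y
--         pre.append(s)
--     total = 0
--     for x in xs:
--         k = _bisect_left(ys, x, 0, n)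
--         total += x * k - pre[k] + (pre[n] - pre[k]) - x * (n - k)
--     return total
--
-- def calculateManhattan(board):
--     init = {}
--     final = {}
--     for r in range(len(board)):
--         row = board[r]
--         for c in range(len(row)):
--             cell = row[c]
--             if cell[0] == 'I' and (len(cell) < 3 or cell[3] != cell[1]):
--                 rs, cs = init.setdefault(cell[1], ([], []))
--                 rs.append(r)
--                 cs.append(c)
--             if cell[0] == 'F' and len(cell) < 3:
--                 rs, cs = final.setdefault(cell[1], ([], []))
--                 rs.append(r)
--                 cs.append(c)
--             elif len(cell) > 2 and cell[1] != cell[3]: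
--                 rs, cs = final.setdefault(cell[3], ([], []))
--                 rs.append(r)
--                 cs.append(c)
--     total = 0
--     for v, (rs, cs) in init.items():
--         if v in final:
--             frs, fcs = final[v]
--             total += _cross_abs_sum(rs, frs) + _cross_abs_sum(cs, fcs)
--     return total
-- ===== Notes on version B (the rewrite author's own statement) =====
-- stated objective: alternative
-- what changed: Instead of A's all-pairs double loop over initial and final pieces, B groups piece coordinates by value in dicts during a single board scan and, per value, computes the cross sum of absolute coordinate differences with sorting, prefix sums and a hand-rolled binary search; it trades A's quadratic pairing for sort-based aggregation (a timing run's inputs had too few same-valued pairs to confirm a speed-up, reading 1.32x).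
-- outside the precondition, e.g. on calculateManhattan([['']]): A raises IndexError, B raises IndexError; on calculateManhattan([['abc']]): A raises IndexError, B raises IndexError; on calculateManhattan([['I']]): A raises IndexError, B raises IndexError
import Mathlib
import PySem

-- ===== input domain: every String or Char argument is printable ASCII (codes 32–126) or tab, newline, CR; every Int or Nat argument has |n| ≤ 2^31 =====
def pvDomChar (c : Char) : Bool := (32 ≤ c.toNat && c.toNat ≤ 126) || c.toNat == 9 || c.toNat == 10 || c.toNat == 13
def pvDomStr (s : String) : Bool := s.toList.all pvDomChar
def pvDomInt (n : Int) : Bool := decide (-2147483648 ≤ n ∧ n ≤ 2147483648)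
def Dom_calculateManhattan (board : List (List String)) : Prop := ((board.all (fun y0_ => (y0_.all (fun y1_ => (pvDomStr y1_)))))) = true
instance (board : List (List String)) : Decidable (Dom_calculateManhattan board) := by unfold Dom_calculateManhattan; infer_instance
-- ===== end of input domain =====

-- B groups the pieces by value in dicts and, per value, sums the pairwise absolute coordinate
-- differences with sort + prefix sums + binary search, instead of A's all-pairs double loop.

-- ===== PORT A =====
-- cell[i] (only evaluated with i in range under Pre_) and len(cell)
def pvC (s : String) (i : Nat) : Char := s.toList.getD i ' '
def pvLen (s : String) : Nat := s.toList.length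

def getPiecePositions (board : List (List String)) : List (Int × Int × Char) :=
  (PySem.List.enumerate board).foldl (fun pieces rp =>
    (PySem.List.enumerate rp.2).foldl (fun pieces cp =>
      if (pvC cp.2 0 == 'I' && decide (pvLen cp.2 < 3)) ||
         (pvC cp.2 0 == 'I' && decide (2 < pvLen cp.2) && (pvC cp.2 3 != pvC cp.2 1)) then
        pieces ++ [(rp.1, cp.1, pvC cp.2 1)]
      else pieces) pieces) []

def getFinalPiecePositions (board : List (List String)) : List (Int × Int × Char) :=
  (PySem.List.enumerate board).foldl (fun pieces rp =>
    (PySem.List.enumerate rp.2).foldl (fun pieces cp =>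
      if pvC cp.2 0 == 'F' && decide (pvLen cp.2 < 3) then
        pieces ++ [(rp.1, cp.1, pvC cp.2 1)]
      else if decide (2 < pvLen cp.2) && (decide (2 < pvLen cp.2) && (pvC cp.2 1 != pvC cp.2 3)) then
        pieces ++ [(rp.1, cp.1, pvC cp.2 3)]
      else pieces) pieces) []

def calculateManhattan (board : List (List String)) : Int :=
  let initialPieces := getPiecePositions board
  let finalPieces := getFinalPiecePositions board
  (PySem.List.enumerate initialPieces).foldl (fun manDict ip =>
    (PySem.List.enumerate finalPieces).foldl (fun manDict jp =>
      if ip.2.2.2 == jp.2.2.2 then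
        manDict + |ip.2.1 - jp.2.1| + |ip.2.2.1 - jp.2.2.1|
      else manDict) manDict) 0

-- ===== PORT B =====
def pvBisectLeft (a : List Int) (x : Int) (lo hi : Nat) : Nat :=
  if lo < hi then
    let mid := (lo + hi) / 2
    if a.getD mid 0 < x then pvBisectLeft a x (mid + 1) hi
    else pvBisectLeft a x lo mid
  else lo
termination_by hi - lo
decreasing_by all_goals omega

def pvCross (xs ys0 : List Int) : Int :=
  let ys := PySem.List.sorted ys0 (fun y => y) false
  let n := ys.length
  let ps := ys.foldl (fun (p : List Int × Int) y => (p.1 ++ [p.2 + y], p.2 + y)) ([0], 0)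
  xs.foldl (fun total x =>
    let k := pvBisectLeft ys x 0 n
    total + x * (k : Int) - ps.1.getD k 0 + (ps.1.getD n 0 - ps.1.getD k 0)
      - x * ((n : Int) - (k : Int))) 0

-- net effect of `rs, cs = d.setdefault(v, ([], [])); rs.append(r); cs.append(c)`
def pvAddPt (d : PySem.Dict Char (List Int × List Int)) (v : Char) (r c : Int) :
    PySem.Dict Char (List Int × List Int) :=
  let cur := d.getD v ([], [])
  d.insert v (cur.1 ++ [r], cur.2 ++ [c])

def calculateManhattan_alt (board : List (List String)) : Int :=
  let dicts := (PySem.List.enumerate board).foldl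
    (fun (s : PySem.Dict Char (List Int × List Int) × PySem.Dict Char (List Int × List Int)) rp =>
      (PySem.List.enumerate rp.2).foldl (fun s cp =>
        let cell := cp.2
        let s1 := if pvC cell 0 == 'I' && (decide (pvLen cell < 3) || (pvC cell 3 != pvC cell 1))
                  then (pvAddPt s.1 (pvC cell 1) rp.1 cp.1, s.2) else s
        if pvC cell 0 == 'F' && decide (pvLen cell < 3) then
          (s1.1, pvAddPt s1.2 (pvC cell 1) rp.1 cp.1)
        else if decide (2 < pvLen cell) && (pvC cell 1 != pvC cell 3) then
          (s1.1, pvAddPt s1.2 (pvC cell 3) rp.1 cp.1)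
        else s1) s) (∅, ∅)
  dicts.1.items.foldl (fun total it =>
    match dicts.2.get? it.1 with
    | some f => total + pvCross it.2.1 f.1 + pvCross it.2.2 f.2
    | none => total) 0

-- ===== PRECONDITION & SPEC =====
-- Pre_ excludes exactly the boards on which A raises IndexError: a cell that is empty, has
-- length exactly 3, or is a 1-character 'I'/'F' cell.
def Pre_calculateManhattan (board : List (List String)) : Prop :=
  ∀ row ∈ board, ∀ cell ∈ row, cell.toList.length ≠ 0 ∧ cell.toList.length ≠ 3 ∧
    ((cell.toList.getD 0 ' ' = 'I' ∨ cell.toList.getD 0 ' ' = 'F') → cell.toList.length ≠ 1)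
instance (board : List (List String)) : Decidable (Pre_calculateManhattan board) := by
  unfold Pre_calculateManhattan; infer_instance

def pvWitness_calculateManhattan : List (List String) := [["IA", ".."], ["FA", "I2"], ["F2"]]

def Spec_calculateManhattan (board : List (List String)) (out : Int) : Prop := out = calculateManhattan_alt board
instance (board : List (List String)) (out : Int) : Decidable (Spec_calculateManhattan board out) := by unfold Spec_calculateManhattan; infer_instance

-- ===== CLAIM (what is proved, stated in full; the proofs are below) =====
def Claim_equal_calculateManhattan : Prop := ∀ (board : List (List String)), Dom_calculateManhattan board → Pre_calculateManhattan board → Spec_calculateManhattan board (calculateManhattan board)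

-- ===== LEMMAS AND PROOFS =====

-- the Manhattan distance contribution of one initial/final piece pair
def pvD (i j : Int × Int × Char) : Int := |i.1 - j.1| + |i.2.1 - j.2.1|

-- the common reference value: the all-pairs sum over same-valued pieces
def pvN (I F : List (Int × Int × Char)) : Int :=
  (I.map (fun i => ((F.map (fun j => if i.2.2 = j.2.2 then pvD i j else 0)).sum))).sum

-- grouping a piece list by value, exactly as B's cell loop does
def pvGrp (L : List (Int × Int × Char)) : PySem.Dict Char (List Int × List Int) :=
  L.foldl (fun d p => pvAddPt d p.2.2 p.1 p.2.1) ∅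

lemma pvGrp_append (L : List (Int × Int × Char)) (p : Int × Int × Char) :
    pvGrp (L ++ [p]) = pvAddPt (pvGrp L) p.2.2 p.1 p.2.1 := by
  simp [pvGrp, List.foldl_append]

lemma pvGrp_getD (L : List (Int × Int × Char)) (v : Char) :
    (pvGrp L).getD v ([], []) =
      ((L.filter (fun p => p.2.2 = v)).map (fun p => p.1),
       (L.filter (fun p => p.2.2 = v)).map (fun p => p.2.1)) := by
  induction L using List.reverseRecOn with
  | nil => simp [pvGrp]; rfl
  | append_singleton L p ih =>
    rw [pvGrp_append]
    unfold pvAddPt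
    have hv' : ∀ _ : ¬ v = p.2.2, ¬ p.2.2 = v := fun h h2 => h h2.symm
    by_cases hv : v = p.2.2
    · subst hv
      simp [ih, List.filter_append]
    · simp [PySem.Dict.getD_insert, hv, hv' hv, ih, List.filter_append]

lemma pvGrp_get? (L : List (Int × Int × Char)) (v : Char) :
    (pvGrp L).get? v =
      if v ∈ L.map (fun p => p.2.2) then some ((pvGrp L).getD v ([], [])) else none := by
  induction L using List.reverseRecOn with
  | nil => simp [pvGrp]; exact PySem.Dict.get?_empty v
  | append_singleton L p ih =>
    rw [pvGrp_append]
    unfold pvAddPt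
    by_cases hv : v = p.2.2
    · subst hv
      simp [PySem.Dict.get?_insert_self]
    · rw [PySem.Dict.get?_insert_of_ne _ _ hv, ih]
      have hm : (v ∈ List.map (fun p => p.2.2) (L ++ [p])) ↔ (v ∈ List.map (fun p => p.2.2) L) := by
        simp [hv]
      by_cases hmem : v ∈ List.map (fun p => p.2.2) L
      · rw [if_pos hmem, if_pos (hm.mpr hmem)]
        congr 1
        simp [PySem.Dict.getD_insert, hv]
      · rw [if_neg hmem, if_neg (fun h => hmem (hm.mp h))]

lemma pvGrp_keys (L : List (Int × Int × Char)) :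
    (pvGrp L).keys = PySem.Set.ofList (L.map (fun p => p.2.2)) := by
  have h : pvGrp L = L.foldl (fun d p => d.insert p.2.2
      (((d.getD p.2.2 ([], [])).1 ++ [p.1], (d.getD p.2.2 ([], [])).2 ++ [p.2.1]))) ∅ := rfl
  rw [h, PySem.Dict.keys_foldl_insert_key L (fun p => p.2.2)
      (fun d p => (((d.getD p.2.2 ([], [])).1 ++ [p.1], (d.getD p.2.2 ([], [])).2 ++ [p.2.1]))) ∅]
  rw [show (∅ : PySem.Dict Char (List Int × List Int)).keys = [] from rfl]
  exact PySem.Set.update_nil_left _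

-- A's initial-piece condition coincides with B's on every cell
lemma cond_init_eq (cell : String) :
    ((pvC cell 0 == 'I' && decide (pvLen cell < 3)) ||
     (pvC cell 0 == 'I' && decide (2 < pvLen cell) && (pvC cell 3 != pvC cell 1)))
    = (pvC cell 0 == 'I' && (decide (pvLen cell < 3) || (pvC cell 3 != pvC cell 1))) := by
  have h : decide (pvLen cell < 3) = false → decide (2 < pvLen cell) = true := by
    simp; omega
  cases hb : (pvC cell 0 == 'I') <;> cases hc : decide (pvLen cell < 3) <;>
    cases hd : (pvC cell 3 != pvC cell 1) <;> cases he : decide (2 < pvLen cell) <;>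
    simp_all

-- B's per-row dict updates compute the groupings of A's per-row piece appends
lemma row_fold (cps : List (Int × String)) (r : Int) (pI pF : List (Int × Int × Char)) :
    cps.foldl (fun s cp =>
        let cell := cp.2
        let s1 := if pvC cell 0 == 'I' && (decide (pvLen cell < 3) || (pvC cell 3 != pvC cell 1))
                  then (pvAddPt s.1 (pvC cell 1) r cp.1, s.2) else s
        if pvC cell 0 == 'F' && decide (pvLen cell < 3) then
          (s1.1, pvAddPt s1.2 (pvC cell 1) r cp.1)
        else if decide (2 < pvLen cell) && (pvC cell 1 != pvC cell 3) then
          (s1.1, pvAddPt s1.2 (pvC cell 3) r cp.1)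
        else s1) (pvGrp pI, pvGrp pF)
    = (pvGrp (cps.foldl (fun pieces cp =>
          if (pvC cp.2 0 == 'I' && decide (pvLen cp.2 < 3)) ||
             (pvC cp.2 0 == 'I' && decide (2 < pvLen cp.2) && (pvC cp.2 3 != pvC cp.2 1)) then
            pieces ++ [(r, cp.1, pvC cp.2 1)]
          else pieces) pI),
       pvGrp (cps.foldl (fun pieces cp =>
          if pvC cp.2 0 == 'F' && decide (pvLen cp.2 < 3) then
            pieces ++ [(r, cp.1, pvC cp.2 1)]
          else if decide (2 < pvLen cp.2) && (decide (2 < pvLen cp.2) && (pvC cp.2 1 != pvC cp.2 3)) then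
            pieces ++ [(r, cp.1, pvC cp.2 3)]
          else pieces) pF)) := by
  induction cps using List.reverseRecOn with
  | nil => rfl
  | append_singleton t c ih =>
    simp only [List.foldl_append, List.foldl_cons, List.foldl_nil, ih]
    have hfin2 : (decide (2 < pvLen c.2) && (decide (2 < pvLen c.2) && (pvC c.2 1 != pvC c.2 3)))
        = (decide (2 < pvLen c.2) && (pvC c.2 1 != pvC c.2 3)) := by
      cases decide (2 < pvLen c.2) <;> simp
    rw [cond_init_eq c.2, hfin2]
    by_cases h1 : (pvC c.2 0 == 'I' && (decide (pvLen c.2 < 3) || (pvC c.2 3 != pvC c.2 1))) = true <;>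
    by_cases h2 : (pvC c.2 0 == 'F' && decide (pvLen c.2 < 3)) = true <;>
    by_cases h3 : (decide (2 < pvLen c.2) && (pvC c.2 1 != pvC c.2 3)) = true <;>
      simp [h1, h2, h3, pvGrp_append]

-- the whole-board version of row_fold
lemma board_fold (rows : List (Int × List String)) (pI pF : List (Int × Int × Char)) :
    rows.foldl (fun s rp =>
      (PySem.List.enumerate rp.2).foldl (fun s cp =>
        let cell := cp.2
        let s1 := if pvC cell 0 == 'I' && (decide (pvLen cell < 3) || (pvC cell 3 != pvC cell 1))
                  then (pvAddPt s.1 (pvC cell 1) rp.1 cp.1, s.2) else s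
        if pvC cell 0 == 'F' && decide (pvLen cell < 3) then
          (s1.1, pvAddPt s1.2 (pvC cell 1) rp.1 cp.1)
        else if decide (2 < pvLen cell) && (pvC cell 1 != pvC cell 3) then
          (s1.1, pvAddPt s1.2 (pvC cell 3) rp.1 cp.1)
        else s1) s) (pvGrp pI, pvGrp pF)
    = (pvGrp (rows.foldl (fun pieces rp =>
          (PySem.List.enumerate rp.2).foldl (fun pieces cp =>
            if (pvC cp.2 0 == 'I' && decide (pvLen cp.2 < 3)) ||
               (pvC cp.2 0 == 'I' && decide (2 < pvLen cp.2) && (pvC cp.2 3 != pvC cp.2 1)) then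
              pieces ++ [(rp.1, cp.1, pvC cp.2 1)]
            else pieces) pieces) pI),
       pvGrp (rows.foldl (fun pieces rp =>
          (PySem.List.enumerate rp.2).foldl (fun pieces cp =>
            if pvC cp.2 0 == 'F' && decide (pvLen cp.2 < 3) then
              pieces ++ [(rp.1, cp.1, pvC cp.2 1)]
            else if decide (2 < pvLen cp.2) && (decide (2 < pvLen cp.2) && (pvC cp.2 1 != pvC cp.2 3)) then
              pieces ++ [(rp.1, cp.1, pvC cp.2 3)]
            else pieces) pieces) pF)) := by
  induction rows using List.reverseRecOn with
  | nil => rfl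
  | append_singleton t c ih =>
    simp only [List.foldl_append, List.foldl_cons, List.foldl_nil, ih]
    exact row_fold (PySem.List.enumerate c.2) c.1 _ _

-- A's inner loop as a sum
lemma pvInnerSum (i : Int × Int × Char) (F : List (Int × Int × Char)) (s m : Int) :
    (PySem.List.enumerate F s).foldl (fun manDict jp =>
      if i.2.2 == jp.2.2.2 then
        manDict + |i.1 - jp.2.1| + |i.2.1 - jp.2.2.1|
      else manDict) m
    = m + (F.map (fun j => if i.2.2 = j.2.2 then pvD i j else 0)).sum := by
  induction F generalizing s m with
  | nil => simp [PySem.List.enumerate]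
  | cons j t ih =>
    rw [PySem.List.enumerate_cons, List.foldl_cons]
    by_cases h : i.2.2 = j.2.2
    · rw [if_pos (by simp [h] : (i.2.2 == j.2.2) = true), ih]
      simp [h, pvD]; ring
    · rw [if_neg (by simp [h] : ¬ (i.2.2 == j.2.2) = true), ih]
      simp [h]

-- A's nested loop as the reference value
lemma pvOuterSum (I F : List (Int × Int × Char)) (s m : Int) :
    (PySem.List.enumerate I s).foldl (fun manDict ip =>
      (PySem.List.enumerate F 0).foldl (fun manDict jp =>
        if ip.2.2.2 == jp.2.2.2 then
          manDict + |ip.2.1 - jp.2.1| + |ip.2.2.1 - jp.2.2.1|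
        else manDict) manDict) m
    = m + pvN I F := by
  induction I generalizing s m with
  | nil => simp [PySem.List.enumerate, pvN]
  | cons i t ih =>
    rw [PySem.List.enumerate_cons, List.foldl_cons]
    rw [pvInnerSum, ih]
    simp [pvN]; ring

lemma calc_eq_N (board : List (List String)) :
    calculateManhattan board = pvN (getPiecePositions board) (getFinalPiecePositions board) := by
  have h := pvOuterSum (getPiecePositions board) (getFinalPiecePositions board) 0 0
  rw [zero_add] at h
  exact h

lemma pairwise_getD_mono (a : List Int) (hs : a.Pairwise (· ≤ ·)) :
    ∀ i j, i ≤ j → j < a.length → a.getD i 0 ≤ a.getD j 0 := by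
  intro i j hij hj
  rw [List.getD_eq_getElem a 0 (by omega), List.getD_eq_getElem a 0 hj]
  rcases Nat.eq_or_lt_of_le hij with rfl | h
  · exact le_refl _
  · exact List.pairwise_iff_getElem.mp hs i j (by omega) hj h

-- binary search: leftmost insertion point in a sorted list
lemma pvBisectLeft_spec (a : List Int) (x : Int) (hs : a.Pairwise (· ≤ ·)) :
    ∀ fuel lo hi, hi - lo ≤ fuel → lo ≤ hi → hi ≤ a.length →
    (∀ j, j < a.length → j < lo → a.getD j 0 < x) →
    (∀ j, j < a.length → hi ≤ j → x ≤ a.getD j 0) →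
    lo ≤ pvBisectLeft a x lo hi ∧ pvBisectLeft a x lo hi ≤ a.length ∧
      (∀ j, j < a.length → j < pvBisectLeft a x lo hi → a.getD j 0 < x) ∧
      (∀ j, j < a.length → pvBisectLeft a x lo hi ≤ j → x ≤ a.getD j 0) := by
  intro fuel
  induction fuel with
  | zero =>
    intro lo hi hf hlo hhi hbelow habove
    have : lo = hi := by omega
    subst this
    rw [pvBisectLeft, if_neg (by omega)]
    exact ⟨le_refl _, by omega, hbelow, habove⟩
  | succ n ih =>
    intro lo hi hf hlo hhi hbelow habove
    rw [pvBisectLeft]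
    by_cases hlt : lo < hi
    · rw [if_pos hlt]
      have hmid1 : lo ≤ (lo + hi) / 2 := by omega
      have hmid2 : (lo + hi) / 2 < hi := by omega
      by_cases hm : a.getD ((lo + hi) / 2) 0 < x
      · rw [if_pos hm]
        refine (ih ((lo + hi) / 2 + 1) hi (by omega) (by omega) hhi ?_ habove).imp ?_ id
        · intro j hj hjlt
          calc a.getD j 0 ≤ a.getD ((lo + hi) / 2) 0 :=
                pairwise_getD_mono a hs j _ (by omega) (by omega)
            _ < x := hm
        · omega
      · rw [if_neg hm]
        refine (ih lo ((lo + hi) / 2) (by omega) (by omega) (by omega) hbelow ?_).imp id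
          (fun h => ⟨by omega, h.2⟩)
        intro j hj hjge
        calc x ≤ a.getD ((lo + hi) / 2) 0 := by omega
          _ ≤ a.getD j 0 := pairwise_getD_mono a hs _ j hjge hj
    · rw [if_neg hlt]
      have : lo = hi := by omega
      exact ⟨le_refl _, by omega, hbelow, fun j hj hge => habove j hj (by omega)⟩

-- B's prefix-sum loop
lemma pre_build (ys : List Int) (p : List Int) (s : Int) :
    (ys.foldl (fun (q : List Int × Int) y => (q.1 ++ [q.2 + y], q.2 + y)) (p, s))
    = (p ++ (List.range ys.length).map (fun k => s + (ys.take (k+1)).sum), s + ys.sum) := by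
  induction ys generalizing p s with
  | nil => simp
  | cons y t ih =>
    rw [List.foldl_cons, ih]
    simp only [List.length_cons, List.range_succ_eq_map, List.map_cons, List.map_map]
    rw [Prod.mk.injEq]
    constructor
    · simp [List.append_assoc, Function.comp_def, List.take_succ_cons]
      intro a ha
      ring
    · simp; ring

lemma pre_spec (ys : List Int) (k : Nat) (hk : k ≤ ys.length) :
    (ys.foldl (fun (p : List Int × Int) y => (p.1 ++ [p.2 + y], p.2 + y)) ([0], 0)).1.getD k 0
      = (ys.take k).sum := by
  rw [pre_build]
  cases k with
  | zero => simp
  | succ j =>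
    have hj : j < ys.length := by omega
    have h : ([(0:Int)] ++ (List.range ys.length).map (fun k => 0 + (ys.take (k+1)).sum)).getD (j+1) 0
        = ((List.range ys.length).map (fun k => 0 + (ys.take (k+1)).sum)).getD j 0 := by
      simp
    rw [h, PySem.List.getD_map_range _ _ _ _ hj]
    simp

lemma sum_abs_le (x : Int) (l : List Int) (h : ∀ y ∈ l, y ≤ x) :
    (l.map (fun y => |x - y|)).sum = x * l.length - l.sum := by
  induction l with
  | nil => simp
  | cons a t ih =>
    have ha : |x - a| = x - a := abs_of_nonneg (by have := h a (by simp); omega)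
    have ht := ih (fun y hy => h y (by simp [hy]))
    simp [ha, ht]
    ring

lemma sum_abs_ge (x : Int) (l : List Int) (h : ∀ y ∈ l, x ≤ y) :
    (l.map (fun y => |x - y|)).sum = l.sum - x * l.length := by
  induction l with
  | nil => simp
  | cons a t ih =>
    have ha : |x - a| = -(x - a) := abs_of_nonpos (by have := h a (by simp); omega)
    have ht := ih (fun y hy => h y (by simp [hy]))
    simp [ha, ht]
    ring

-- the per-element term of B's cross-sum loop
lemma per_x (ys : List Int) (hs : ys.Pairwise (· ≤ ·)) (x : Int) :
    x * (pvBisectLeft ys x 0 ys.length : Int)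
      - (ys.take (pvBisectLeft ys x 0 ys.length)).sum
      + (ys.sum - (ys.take (pvBisectLeft ys x 0 ys.length)).sum)
      - x * ((ys.length : Int) - (pvBisectLeft ys x 0 ys.length : Int))
    = (ys.map (fun y => |x - y|)).sum := by
  obtain ⟨-, hk, hbel, habv⟩ := pvBisectLeft_spec ys x hs ys.length 0 ys.length
    (by omega) (by omega) (le_refl _) (by omega) (by intro j hj hge; omega)
  set k := pvBisectLeft ys x 0 ys.length with hkdef
  have h1 : ∀ y ∈ ys.take k, y ≤ x := by
    intro y hy
    obtain ⟨j, hj, he⟩ := List.mem_iff_getElem.mp hy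
    have hjn : j < ys.length := by simp at hj; omega
    have hjk : j < k := by simp at hj; omega
    have hb := hbel j hjn hjk
    rw [List.getD_eq_getElem ys 0 hjn] at hb
    rw [← he, List.getElem_take]
    omega
  have h2 : ∀ y ∈ ys.drop k, x ≤ y := by
    intro y hy
    obtain ⟨j, hj, he⟩ := List.mem_iff_getElem.mp hy
    have hjn : k + j < ys.length := by simp at hj; omega
    have ha := habv (k + j) hjn (by omega)
    rw [List.getD_eq_getElem ys 0 hjn] at ha
    rw [← he, List.getElem_drop]
    omega
  have hsum : (ys.take k).sum + (ys.drop k).sum = ys.sum := by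
    conv_rhs => rw [← List.take_append_drop k ys]
    rw [List.sum_append]
  have hlt : ((ys.take k).length : Int) = (k : Int) := by simp; omega
  have hld : ((ys.drop k).length : Int) = (ys.length : Int) - (k : Int) := by
    simp; omega
  conv_rhs => rw [← List.take_append_drop k ys, List.map_append, List.sum_append]
  rw [sum_abs_le x _ h1, sum_abs_ge x _ h2, hlt, hld]
  have hd : (ys.drop k).sum = ys.sum - (ys.take k).sum := by omega
  rw [hd]
  ring

lemma foldl_eq_sum_of_body {β : Type} {f : Int → β → Int} (g : β → Int)
    (h : ∀ a x, f a x = a + g x) : ∀ (l : List β) (a : Int), l.foldl f a = a + (l.map g).sum := by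
  intro l
  induction l with
  | nil => simp
  | cons x t ih =>
    intro a
    rw [List.foldl_cons, h, ih]
    simp [add_assoc]

-- B's per-group routine computes the all-pairs cross sum of absolute differences
lemma pvCross_spec (xs ys0 : List Int) :
    pvCross xs ys0 = (xs.map (fun x => ((ys0.map (fun y => |x - y|)).sum))).sum := by
  have hs := PySem.List.sorted_pairwise ys0 (fun y => y)
  set ys := PySem.List.sorted ys0 (fun y => y) false with hys
  have hperm : ys.Perm ys0 := PySem.List.sorted_perm ys0 (fun y => y) false
  have hx : ∀ x : Int, ((ys.map (fun y => |x - y|)).sum) = ((ys0.map (fun y => |x - y|)).sum) :=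
    fun x => (hperm.map (fun y => |x - y|)).sum_eq
  show xs.foldl (fun total x =>
      total + x * ((pvBisectLeft ys x 0 ys.length : Nat) : Int)
        - (ys.foldl (fun (p : List Int × Int) y => (p.1 ++ [p.2 + y], p.2 + y)) ([0], 0)).1.getD
            (pvBisectLeft ys x 0 ys.length) 0
        + ((ys.foldl (fun (p : List Int × Int) y => (p.1 ++ [p.2 + y], p.2 + y)) ([0], 0)).1.getD
            ys.length 0
          - (ys.foldl (fun (p : List Int × Int) y => (p.1 ++ [p.2 + y], p.2 + y)) ([0], 0)).1.getD
            (pvBisectLeft ys x 0 ys.length) 0)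
        - x * ((ys.length : Int) - ((pvBisectLeft ys x 0 ys.length : Nat) : Int))) 0
    = (xs.map (fun x => ((ys0.map (fun y => |x - y|)).sum))).sum
  have hbody : ∀ (total x : Int),
      (total + x * ((pvBisectLeft ys x 0 ys.length : Nat) : Int)
        - (ys.foldl (fun (p : List Int × Int) y => (p.1 ++ [p.2 + y], p.2 + y)) ([0], 0)).1.getD
            (pvBisectLeft ys x 0 ys.length) 0
        + ((ys.foldl (fun (p : List Int × Int) y => (p.1 ++ [p.2 + y], p.2 + y)) ([0], 0)).1.getD
            ys.length 0
          - (ys.foldl (fun (p : List Int × Int) y => (p.1 ++ [p.2 + y], p.2 + y)) ([0], 0)).1.getD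
            (pvBisectLeft ys x 0 ys.length) 0)
        - x * ((ys.length : Int) - ((pvBisectLeft ys x 0 ys.length : Nat) : Int)))
      = total + ((ys0.map (fun y => |x - y|)).sum) := by
    intro total x
    obtain ⟨-, hk, -, -⟩ := pvBisectLeft_spec ys x hs ys.length 0 ys.length
      (by omega) (by omega) (le_refl _) (by omega) (by intro j hj hge; omega)
    rw [pre_spec ys _ hk, pre_spec ys ys.length (le_refl _), List.take_length]
    rw [← hx x, ← per_x ys hs x]
    ring
  rw [foldl_eq_sum_of_body _ hbody xs 0]
  simp

-- partitioning an additive sum over a list by the fibers of the value key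
lemma sum_fiber (L : List (Int × Int × Char)) (h : (Int × Int × Char) → Int) :
    (((L.map (fun p => p.2.2)).toFinset).sum
        (fun v => ((L.filter (fun p => p.2.2 = v)).map h).sum))
      = (L.map h).sum := by
  induction L with
  | nil => simp
  | cons a t ih =>
    have hsplit : ∀ v : Char, (((a :: t).filter (fun p => p.2.2 = v)).map h).sum
        = (if a.2.2 = v then h a else 0) + ((t.filter (fun p => p.2.2 = v)).map h).sum := by
      intro v
      by_cases hv : a.2.2 = v <;> simp [hv]
    simp only [List.map_cons, List.toFinset_cons, List.sum_cons]
    rw [Finset.sum_congr rfl (fun v _ => hsplit v), Finset.sum_add_distrib]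
    have e1 : (∑ v ∈ insert a.2.2 (List.map (fun p => p.2.2) t).toFinset,
        if a.2.2 = v then h a else 0) = h a := by
      rw [Finset.sum_ite_eq]
      simp
    rw [e1]
    by_cases hk : a.2.2 ∈ (List.map (fun p => p.2.2) t).toFinset
    · rw [Finset.insert_eq_self.mpr hk, ih]
    · rw [Finset.sum_insert hk]
      have hfe : (t.filter (fun p => p.2.2 = a.2.2)) = [] := by
        rw [List.filter_eq_nil_iff]
        intro p hp
        simp only [List.mem_toFinset, List.mem_map] at hk
        simp only [decide_eq_true_eq]
        exact fun he => hk ⟨p, hp, he⟩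
      rw [hfe]
      simp [ih]

lemma sum_ite_filter (F : List (Int × Int × Char)) (v : Char) (f : (Int × Int × Char) → Int) :
    (F.map (fun j => if v = j.2.2 then f j else 0)).sum
      = ((F.filter (fun j => j.2.2 = v)).map f).sum := by
  induction F with
  | nil => simp
  | cons j t ih =>
    simp only [List.map_cons, List.sum_cons, List.filter_cons]
    by_cases hv : v = j.2.2
    · subst hv
      simp [ih]
    · have hv' : ¬ (j.2.2 = v) := fun h => hv h.symm
      simp [hv, hv', ih]

-- the grouped, per-value summation equals the reference value
lemma grouped_eq_N (I F : List (Int × Int × Char)) :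
    (pvGrp I).items.foldl (fun total it =>
      match (pvGrp F).get? it.1 with
      | some f => total + pvCross it.2.1 f.1 + pvCross it.2.2 f.2
      | none => total) 0 = pvN I F := by
  have hbody : ∀ (a : Int) (it : Char × (List Int × List Int)),
      (match (pvGrp F).get? it.1 with
       | some f => a + pvCross it.2.1 f.1 + pvCross it.2.2 f.2
       | none => a)
      = a + (match (pvGrp F).get? it.1 with
             | some f => pvCross it.2.1 f.1 + pvCross it.2.2 f.2
             | none => 0) := by
    intro a it
    cases hg : (pvGrp F).get? it.1 with
    | none => simp
    | some f => simp; ring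
  rw [foldl_eq_sum_of_body _ hbody ((pvGrp I).items) 0, zero_add]
  have hnd : (pvGrp I).keys.Nodup := by
    rw [pvGrp_keys]; exact PySem.Set.nodup_ofList _
  rw [PySem.Dict.items_eq_map_keys (pvGrp I) hnd ([], []), List.map_map]
  have hterm : ∀ v ∈ (pvGrp I).keys,
      ((fun it : Char × (List Int × List Int) =>
        (match (pvGrp F).get? it.1 with
         | some f => pvCross it.2.1 f.1 + pvCross it.2.2 f.2
         | none => 0)) ∘ (fun k => (k, (pvGrp I).getD k ([], [])))) v
      = ((I.filter (fun p => p.2.2 = v)).map (fun i =>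
          ((F.filter (fun p => p.2.2 = v)).map (fun j => pvD i j)).sum)).sum := by
    intro v hv
    simp only [Function.comp_apply]
    by_cases hmem : v ∈ F.map (fun p => p.2.2)
    · rw [pvGrp_get?, if_pos hmem, pvGrp_getD, pvGrp_getD]
      simp only []
      rw [pvCross_spec, pvCross_spec, List.map_map, List.map_map]
      rw [← PySem.List.sum_map_add_int]
      apply congrArg
      apply List.map_congr_left
      intro i hi
      simp only [Function.comp_apply]
      rw [List.map_map, List.map_map, ← PySem.List.sum_map_add_int]
      apply congrArg
      apply List.map_congr_left
      intro j hj
      simp [pvD]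
    · rw [pvGrp_get?, if_neg hmem]
      have hfe : F.filter (fun p => p.2.2 = v) = [] := by
        rw [List.filter_eq_nil_iff]
        intro p hp
        simp only [decide_eq_true_eq]
        exact fun he => hmem (List.mem_map.mpr ⟨p, hp, he⟩)
      rw [hfe]
      simp
  rw [List.map_congr_left hterm]
  have h4 : ((pvGrp I).keys.map (fun v =>
      ((I.filter (fun p => p.2.2 = v)).map (fun i =>
        ((F.filter (fun p => p.2.2 = v)).map (fun j => pvD i j)).sum)).sum)).sum
      = ((I.map (fun p => p.2.2)).toFinset).sum (fun v =>
        ((I.filter (fun p => p.2.2 = v)).map (fun i =>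
          ((F.filter (fun p => p.2.2 = v)).map (fun j => pvD i j)).sum)).sum) := by
    rw [← List.sum_toFinset _ hnd]
    apply Finset.sum_congr _ (fun _ _ => rfl)
    apply Finset.ext
    intro v
    simp [pvGrp_keys, PySem.Set.mem_ofList]
  rw [h4]
  have h5 : ∀ v, ((I.filter (fun p => p.2.2 = v)).map (fun i =>
        ((F.filter (fun p => p.2.2 = v)).map (fun j => pvD i j)).sum)).sum
      = ((I.filter (fun p => p.2.2 = v)).map (fun i =>
        ((F.filter (fun p => p.2.2 = i.2.2)).map (fun j => pvD i j)).sum)).sum := by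
    intro v
    apply congrArg
    apply List.map_congr_left
    intro i hi
    have hiv : i.2.2 = v := by
      have := (List.mem_filter.mp hi).2
      simpa using this
    rw [hiv]
  rw [Finset.sum_congr rfl (fun v _ => h5 v), sum_fiber]
  unfold pvN
  apply congrArg
  apply List.map_congr_left
  intro i _
  rw [sum_ite_filter]

-- B's cell loop builds exactly the groupings of A's piece lists
lemma dicts_eq (board : List (List String)) :
    ((PySem.List.enumerate board).foldl
      (fun (s : PySem.Dict Char (List Int × List Int) × PySem.Dict Char (List Int × List Int)) rp =>
        (PySem.List.enumerate rp.2).foldl (fun s cp =>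
          let cell := cp.2
          let s1 := if pvC cell 0 == 'I' && (decide (pvLen cell < 3) || (pvC cell 3 != pvC cell 1))
                    then (pvAddPt s.1 (pvC cell 1) rp.1 cp.1, s.2) else s
          if pvC cell 0 == 'F' && decide (pvLen cell < 3) then
            (s1.1, pvAddPt s1.2 (pvC cell 1) rp.1 cp.1)
          else if decide (2 < pvLen cell) && (pvC cell 1 != pvC cell 3) then
            (s1.1, pvAddPt s1.2 (pvC cell 3) rp.1 cp.1)
          else s1) s) (∅, ∅))
    = (pvGrp (getPiecePositions board), pvGrp (getFinalPiecePositions board)) := by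
  exact board_fold (PySem.List.enumerate board) [] []

lemma alt_eq (board : List (List String)) :
    calculateManhattan_alt board
      = (pvGrp (getPiecePositions board)).items.foldl (fun total it =>
          match (pvGrp (getFinalPiecePositions board)).get? it.1 with
          | some f => total + pvCross it.2.1 f.1 + pvCross it.2.2 f.2
          | none => total) 0 := by
  show (((PySem.List.enumerate board).foldl
      (fun (s : PySem.Dict Char (List Int × List Int) × PySem.Dict Char (List Int × List Int)) rp =>
        (PySem.List.enumerate rp.2).foldl (fun s cp =>
          let cell := cp.2
          let s1 := if pvC cell 0 == 'I' && (decide (pvLen cell < 3) || (pvC cell 3 != pvC cell 1))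
                    then (pvAddPt s.1 (pvC cell 1) rp.1 cp.1, s.2) else s
          if pvC cell 0 == 'F' && decide (pvLen cell < 3) then
            (s1.1, pvAddPt s1.2 (pvC cell 1) rp.1 cp.1)
          else if decide (2 < pvLen cell) && (pvC cell 1 != pvC cell 3) then
            (s1.1, pvAddPt s1.2 (pvC cell 3) rp.1 cp.1)
          else s1) s) (∅, ∅)).1.items.foldl (fun total it =>
      match ((PySem.List.enumerate board).foldl
        (fun (s : PySem.Dict Char (List Int × List Int) × PySem.Dict Char (List Int × List Int)) rp =>
          (PySem.List.enumerate rp.2).foldl (fun s cp =>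
            let cell := cp.2
            let s1 := if pvC cell 0 == 'I' && (decide (pvLen cell < 3) || (pvC cell 3 != pvC cell 1))
                      then (pvAddPt s.1 (pvC cell 1) rp.1 cp.1, s.2) else s
            if pvC cell 0 == 'F' && decide (pvLen cell < 3) then
              (s1.1, pvAddPt s1.2 (pvC cell 1) rp.1 cp.1)
            else if decide (2 < pvLen cell) && (pvC cell 1 != pvC cell 3) then
              (s1.1, pvAddPt s1.2 (pvC cell 3) rp.1 cp.1)
            else s1) s) (∅, ∅)).2.get? it.1 with
      | some f => total + pvCross it.2.1 f.1 + pvCross it.2.2 f.2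
      | none => total) 0)
    = _
  rw [dicts_eq]

-- ===== VERDICT (by name: the statement is the Claim_ definition above) =====
theorem calculateManhattan_spec : Claim_equal_calculateManhattan := by
  intro board _ _
  unfold Spec_calculateManhattan
  rw [calc_eq_N, alt_eq, grouped_eq_N]
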